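-- pv_equiv track=rewrite | github.com/Xrenya/Algorithms | yandex/Lecture_2/Lecture/main.py | find_max_and_prev
-- ===== SOURCE A (Python) =====
-- def find_max_and_prev(seq):
--     now_max = max(seq[:2])
--     prev = min(seq[:2])
--     for i in range(2, len(seq)):
--         if seq[i] > now_max:
--             prev = now_max
--             now_max = seq[i]
--         elif seq[i] > prev:
--             prev = seq[i]
--     return prev, now_max
-- ===== SOURCE B (Python) =====
-- def find_max_and_prev(seq):
--     if len(seq) == 1:
--         return seq[0], seq[0]
--     s = sorted(seq)
--     return s[-2], s[-1]
-- ===== Notes on version B (the rewrite author's own statement) =====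
-- stated objective: simpler
-- what changed: Replaces A's incremental two-variable scan (initial max/min of the first two, then tracked updates) with sort-then-index: sort a copy and return the last two elements, with a short guard for singletons.
import Mathlib
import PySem

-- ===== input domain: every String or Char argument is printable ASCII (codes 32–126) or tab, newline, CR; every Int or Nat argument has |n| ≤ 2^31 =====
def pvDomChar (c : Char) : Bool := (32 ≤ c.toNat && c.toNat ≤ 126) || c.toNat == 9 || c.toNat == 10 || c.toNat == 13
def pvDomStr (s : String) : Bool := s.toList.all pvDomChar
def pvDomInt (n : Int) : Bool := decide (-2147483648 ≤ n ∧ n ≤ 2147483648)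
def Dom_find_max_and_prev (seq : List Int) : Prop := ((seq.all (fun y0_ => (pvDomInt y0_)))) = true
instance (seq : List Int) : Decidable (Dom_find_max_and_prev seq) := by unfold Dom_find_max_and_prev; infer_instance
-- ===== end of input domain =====

-- B replaces A's single-pass two-variable scan with sort-then-index (simpler, not faster);
-- both raise on the empty list, which Pre_ excludes.

-- ===== PORT A =====
-- the loop body of A's for-loop (if/elif/else on the state (prev, now_max))
def stepA (pm : Int × Int) (x : Int) : Int × Int :=
  if x > pm.2 then (pm.2, x)
  else if x > pm.1 then (x, pm.2)
  else pm

def find_max_and_prev (seq : List Int) : Int × Int :=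
  let first2 := PySem.List.slice seq (some 0) (some 2)
  -- max()/min() raise ValueError on an empty sequence; Pre_ excludes seq = []
  let now_max := (PySem.List.max? first2 (fun x => x)).getD 0
  let prev := (PySem.List.min? first2 (fun x => x)).getD 0
  (PySem.List.pyRange 2 (PySem.List.len seq) 1).foldl
    (fun pm i => stepA pm (PySem.List.pyGetD seq i 0))
    (prev, now_max)

-- ===== PORT B =====
def find_max_and_prev_alt (seq : List Int) : Int × Int :=
  if seq.length == 1 then
    let x := (PySem.List.pyGet? seq 0).getD 0
    (x, x)
  else
    let s := PySem.List.sorted seq (fun x => x)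
    -- s[-2] / s[-1]; IndexError on the empty list is excluded by Pre_
    ((PySem.List.pyGet? s (-2)).getD 0, (PySem.List.pyGet? s (-1)).getD 0)

-- ===== PRECONDITION & SPEC =====
-- Pre_ excludes exactly the empty list, on which A raises ValueError (max of empty) and B raises IndexError.
def Pre_find_max_and_prev (seq : List Int) : Prop := seq ≠ []
instance (seq : List Int) : Decidable (Pre_find_max_and_prev seq) := by unfold Pre_find_max_and_prev; infer_instance
def pvWitness_find_max_and_prev : List Int := [3, 1, 2]

def Spec_find_max_and_prev (seq : List Int) (out : Int × Int) : Prop := out = find_max_and_prev_alt seq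
instance (seq : List Int) (out : Int × Int) : Decidable (Spec_find_max_and_prev seq out) := by unfold Spec_find_max_and_prev; infer_instance

-- ===== CLAIM (what is proved, stated in full; the proofs are below) =====
def Claim_equal_find_max_and_prev : Prop := ∀ (seq : List Int), Dom_find_max_and_prev seq → Pre_find_max_and_prev seq → Spec_find_max_and_prev seq (find_max_and_prev seq)

-- ===== LEMMAS AND PROOFS =====

-- inserting x into u ++ [p, m] (u all ≤ p ≤ m) puts the two largest at the end, exactly as stepA says
lemma ins_lemma (x p m : Int) (u : List Int) (hu : ∀ y ∈ u, y ≤ p) (hpm : p ≤ m) :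
    ∃ u', PySem.List.insertBy (fun a b => decide (a < b)) x (u ++ [p, m])
            = u' ++ [(stepA (p, m) x).1, (stepA (p, m) x).2]
          ∧ (∀ y ∈ u', y ≤ (stepA (p, m) x).1)
          ∧ p ≤ (stepA (p, m) x).1
          ∧ (stepA (p, m) x).1 ≤ (stepA (p, m) x).2 := by
  induction u with
  | nil =>
    by_cases h1 : x < p
    · have hst : stepA (p, m) x = (p, m) := by
        simp only [stepA]; split_ifs <;> first | rfl | (exfalso; omega)
      refine ⟨[x], ?_, ?_, ?_, ?_⟩ <;> rw [hst]
      · simp [PySem.List.insertBy, h1]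
      · intro y hy; simp only [List.mem_singleton] at hy; omega
      · exact hpm
    · by_cases h2 : x < m
      · have hst : stepA (p, m) x = (x, m) := by
          simp only [stepA]; split_ifs with hA hB
          · exfalso; omega
          · rfl
          · have hxp : x = p := by omega
            rw [hxp]
        refine ⟨[p], ?_, ?_, ?_, ?_⟩ <;> rw [hst]
        · simp [PySem.List.insertBy, h1, h2]
        · intro y hy; simp only [List.mem_singleton] at hy; omega
        · simp only; omega
        · simp only; omega
      · have hst : stepA (p, m) x = (m, x) := by
          simp only [stepA]; split_ifs with hA hB
          · rfl
          · have hxm : x = m := by omega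
            rw [hxm]
          · have hp : p = m := by omega
            have hx : x = m := by omega
            rw [hp, hx]
        refine ⟨[p], ?_, ?_, ?_, ?_⟩ <;> rw [hst]
        · simp [PySem.List.insertBy, h1, h2]
        · intro y hy; simp only [List.mem_singleton] at hy; omega
        · exact hpm
        · simp only; omega
  | cons z u ih =>
    have hz : z ≤ p := hu z (by simp)
    by_cases h1 : x < z
    · have hst : stepA (p, m) x = (p, m) := by
        simp only [stepA]; split_ifs <;> first | rfl | (exfalso; omega)
      refine ⟨x :: z :: u, ?_, ?_, ?_, ?_⟩ <;> rw [hst]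
      · simp [PySem.List.insertBy, h1]
      · intro y hy
        simp only [List.mem_cons] at hy
        rcases hy with rfl | rfl | hy
        · omega
        · exact hz
        · exact hu y (List.mem_cons_of_mem _ hy)
      · exact hpm
    · obtain ⟨u', hins, hle, hp, hord⟩ := ih (fun y hy => hu y (List.mem_cons_of_mem _ hy))
      refine ⟨z :: u', ?_, ?_, hp, hord⟩
      · simp [PySem.List.insertBy, h1, hins]
      · intro y hy
        rcases List.mem_cons.mp hy with rfl | hy
        · omega
        · exact hle y hy

-- sorted(xs ++ [x]) is insertion of x into sorted(xs)
lemma sorted_snoc (xs : List Int) (x : Int) :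
    PySem.List.sorted (xs ++ [x]) (fun y => y)
      = PySem.List.insertBy (fun a b => decide (a < b)) x (PySem.List.sorted xs (fun y => y)) := by
  rw [PySem.List.sorted_eq_foldl_insertBy, PySem.List.sorted_eq_foldl_insertBy, List.foldl_append]
  rfl

-- main invariant: the tail of the sorted list is exactly A's loop state
lemma sorted_inv (l : List Int) : ∀ a b : Int, a ≤ b →
    ∃ u, PySem.List.sorted (a :: b :: l) (fun y => y)
           = u ++ [(l.foldl stepA (a, b)).1, (l.foldl stepA (a, b)).2]
         ∧ (∀ y ∈ u, y ≤ (l.foldl stepA (a, b)).1)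
         ∧ (l.foldl stepA (a, b)).1 ≤ (l.foldl stepA (a, b)).2 := by
  induction l using List.reverseRecOn with
  | nil =>
    intro a b hab
    refine ⟨[], ?_, by simp, by simpa using hab⟩
    simpa using PySem.List.sorted_eq_self_of_pairwise [a, b] (fun y => y) (by
      refine List.Pairwise.cons ?_ (List.pairwise_singleton _ _)
      intro y hy
      simp only [List.mem_singleton] at hy
      simpa [hy] using hab)
  | append_singleton l x ih =>
    intro a b hab
    obtain ⟨u, hs, hu, hord⟩ := ih a b hab
    have hcons : a :: b :: (l ++ [x]) = (a :: b :: l) ++ [x] := by simp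
    obtain ⟨u', hins, hle, _, hord'⟩ :=
      ins_lemma x (l.foldl stepA (a, b)).1 (l.foldl stepA (a, b)).2 u hu hord
    refine ⟨u', ?_, ?_, ?_⟩
    · rw [hcons, sorted_snoc, hs, hins]
      simp [List.foldl_append]
    · simpa [List.foldl_append] using hle
    · simpa [List.foldl_append] using hord'

-- ===== VERDICT (by name: the statement is the Claim_ definition above) =====
theorem find_max_and_prev_spec : Claim_equal_find_max_and_prev := by
  intro seq _ hpre
  unfold Spec_find_max_and_prev
  match seq with
  | [] => exact absurd rfl hpre
  | [a] =>
    simp [find_max_and_prev, find_max_and_prev_alt, PySem.List.slice, PySem.List.max?,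
      PySem.List.min?, PySem.List.pyRange, PySem.List.pyGet?, PySem.List.pyIdx?,
      PySem.List.len, PySem.List.clampIdx]
  | a :: b :: l =>
    -- A's side reduces to the fold of stepA
    have hA : find_max_and_prev (a :: b :: l) = l.foldl stepA (min a b, max a b) := by
      unfold find_max_and_prev
      rw [PySem.List.foldl_pyRange_pyGetD (a := 2) (a :: b :: l) 0 stepA _ (by omega)]
      have h2 : PySem.List.slice (a :: b :: l) (some 0) (some 2) = [a, b] := by
        simp [PySem.List.slice, PySem.List.clampIdx]
      simp [h2, PySem.List.max?_id_cons, PySem.List.min?_id_cons]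
    -- B's side reads the last two of the sorted list
    have hperm : (min a b :: max a b :: l).Perm (a :: b :: l) := by
      rcases le_total a b with h | h
      · simp [min_eq_left h, max_eq_right h]
      · simp only [min_eq_right h, max_eq_left h]
        exact List.Perm.swap a b l
    obtain ⟨u, hs, _, _⟩ := sorted_inv l (min a b) (max a b) (min_le_max)
    have hsort : PySem.List.sorted (a :: b :: l) (fun y => y)
        = u ++ [(l.foldl stepA (min a b, max a b)).1, (l.foldl stepA (min a b, max a b)).2] := by
      rw [← PySem.List.sorted_eq_sorted_of_perm _ _ _ (fun x y h => h) hperm]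
      exact hs
    have hlen : (PySem.List.sorted (a :: b :: l) (fun y => y)).length = u.length + 2 := by
      rw [hsort]; simp
    have hB : find_max_and_prev_alt (a :: b :: l) = l.foldl stepA (min a b, max a b) := by
      unfold find_max_and_prev_alt
      have hne : ((a :: b :: l).length == 1) = false := by simp
      rw [hne]
      simp only
      rw [PySem.List.pyGet?_neg_ofNat _ 2 (by omega) (by omega),
          PySem.List.pyGet?_neg_ofNat _ 1 (by omega) (by omega), hsort]
      have h1 : (u ++ [(l.foldl stepA (min a b, max a b)).1, (l.foldl stepA (min a b, max a b)).2]).length - 2 = u.length := by simp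
      have h2 : (u ++ [(l.foldl stepA (min a b, max a b)).1, (l.foldl stepA (min a b, max a b)).2]).length - 1 = u.length + 1 := by simp
      rw [h1, h2]
      simp
    rw [hA, hB]
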